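-- pv_equiv track=rewrite | github.com/r-fsantos/algorithms | bigOExamples/sum_char_codes.py | sum_char_codes_matching
-- ===== SOURCE A (Python) =====
-- def sum_char_codes_matching(string: str, needle: int) -> int:
--     total_sum = 0
--
--     for char in string:
--         code = ord(char)
--
--         if code == needle:
--             return total_sum
--
--         total_sum += code
--
--     return total_sum
-- ===== SOURCE B (Python) =====
-- def sum_char_codes_matching(string: str, needle: int) -> int:
--     codes = [ord(c) for c in string]
--     i = codes.index(needle) if needle in codes else len(codes)
--     return sum(codes[:i])
-- ===== Notes on version B (the rewrite author's own statement) =====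
-- stated objective: alternative
-- what changed: Replaces the fused accumulate-with-early-return loop by a locate-then-sum decomposition: build the code list, find the needle's index (or the length if absent), and sum the prefix before it.
import Mathlib
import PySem

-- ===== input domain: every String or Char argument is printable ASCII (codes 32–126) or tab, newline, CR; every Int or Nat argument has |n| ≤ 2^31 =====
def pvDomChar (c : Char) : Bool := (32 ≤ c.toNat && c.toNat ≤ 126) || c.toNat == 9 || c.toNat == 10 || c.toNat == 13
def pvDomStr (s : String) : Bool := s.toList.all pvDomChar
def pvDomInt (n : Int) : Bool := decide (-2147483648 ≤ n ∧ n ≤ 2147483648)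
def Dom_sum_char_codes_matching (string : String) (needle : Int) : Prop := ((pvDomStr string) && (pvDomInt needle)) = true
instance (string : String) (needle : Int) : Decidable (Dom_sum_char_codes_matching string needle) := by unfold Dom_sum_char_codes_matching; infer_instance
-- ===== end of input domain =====

-- B replaces A's fused accumulate-with-early-return loop by a locate-then-sum decomposition
-- (find the needle's index in the code list, then sum the prefix); objective: alternative, same cost.

-- ===== PORT A =====
-- the for-loop with early return, as structural recursion over the characters with the running total
def pvGoA (needle : Int) : List Char → Int → Int
  | [], acc => acc
  | c :: cs, acc =>
    let code : Int := (c.toNat : Int)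
    if code = needle then acc else pvGoA needle cs (acc + code)

def sum_char_codes_matching (string : String) (needle : Int) : Int :=
  pvGoA needle string.toList 0

-- ===== PORT B =====
-- codes = [ord(c) for c in string]; i = codes.index(needle) if needle in codes else len(codes); sum(codes[:i])
-- codes[:i] with 0 ≤ i ≤ len(codes) is exactly List.take i
def sum_char_codes_matching_alt (string : String) (needle : Int) : Int :=
  let codes := string.toList.map (fun c => (c.toNat : Int))
  let i : Nat :=
    match PySem.List.index? codes needle with
    | some k => k
    | none => codes.length
  (codes.take i).sum

-- ===== PRECONDITION & SPEC =====
def Spec_sum_char_codes_matching (string : String) (needle : Int) (out : Int) : Prop := out = sum_char_codes_matching_alt string needle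
instance (string : String) (needle : Int) (out : Int) : Decidable (Spec_sum_char_codes_matching string needle out) := by unfold Spec_sum_char_codes_matching; infer_instance

-- ===== CLAIM (what is proved, stated in full; the proofs are below) =====
def Claim_equal_sum_char_codes_matching : Prop := ∀ (string : String) (needle : Int), Dom_sum_char_codes_matching string needle → Spec_sum_char_codes_matching string needle (sum_char_codes_matching string needle)

-- ===== LEMMAS AND PROOFS =====
-- B's body as a function of the char list, for the induction
def pvAltBody (needle : Int) (cs : List Char) : Int :=
  let codes := cs.map (fun c => (c.toNat : Int))
  let i : Nat :=
    match PySem.List.index? codes needle with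
    | some k => k
    | none => codes.length
  (codes.take i).sum

theorem pvGoA_eq (needle : Int) : ∀ (cs : List Char) (acc : Int),
    pvGoA needle cs acc = acc + pvAltBody needle cs := by
  intro cs
  induction cs with
  | nil => intro acc; simp [pvGoA, pvAltBody, PySem.List.index?]
  | cons c cs ih =>
    intro acc
    by_cases h : (c.toNat : Int) = needle
    · have hb : pvAltBody needle (c :: cs) = 0 := by
        unfold pvAltBody
        simp only [List.map_cons, h, PySem.List.index?_cons_self]
        simp
      rw [pvGoA, if_pos h, hb]; ring
    · have hb : pvAltBody needle (c :: cs) = (c.toNat : Int) + pvAltBody needle cs := by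
        unfold pvAltBody
        simp only [List.map_cons]
        rw [PySem.List.index?_cons_of_ne _ h]
        cases PySem.List.index? (cs.map fun c => (c.toNat : Int)) needle with
        | none => simp
        | some k => simp
      rw [pvGoA, if_neg h, ih, hb]
      ring

-- ===== VERDICT (by name: the statement is the Claim_ definition above) =====
theorem sum_char_codes_matching_spec : Claim_equal_sum_char_codes_matching := by
  intro string needle _
  show sum_char_codes_matching string needle = sum_char_codes_matching_alt string needle
  have := pvGoA_eq needle string.toList 0
  simpa [sum_char_codes_matching, sum_char_codes_matching_alt, pvAltBody] using this
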